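-- pv_equiv track=rewrite | github.com/aviadkim/adobe-pdf-extraction-100-accuracy | extract_with_token.py | is_financial_content
-- ===== SOURCE A (Python) =====
-- def is_financial_content(text):
--     """Check if text contains financial/securities information"""
--     financial_keywords = [
--         'bond', 'equity', 'fund', 'stock', 'share', 'isin', 'cusip',
--         'usd', 'eur', 'chf', 'price', 'value', 'market', 'portfolio',
--         'valuation', 'allocation', 'yield', 'maturity', 'coupon'
--     ]
--
--     text_lower = text.lower()
--     return any(keyword in text_lower for keyword in financial_keywords)
-- ===== SOURCE B (Python) =====
-- def is_financial_content(text):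
--     """Check if text contains financial/securities information.
--
--     Single left-to-right scan: at each position of the lowered text, test
--     whether some keyword starts there (instead of 19 separate substring passes).
--     """
--     keywords = (
--         'bond', 'equity', 'fund', 'stock', 'share', 'isin', 'cusip',
--         'usd', 'eur', 'chf', 'price', 'value', 'market', 'portfolio',
--         'valuation', 'allocation', 'yield', 'maturity', 'coupon'
--     )
--     t = text.lower()
--     for i in range(len(t)):
--         for kw in keywords:
--             if t.startswith(kw, i):
--                 return True
--     return False
-- ===== Notes on version B (the rewrite author's own statement) =====
-- stated objective: alternative
-- what changed: Replaces 19 independent substring-membership passes over the lowered text with one left-to-right scan that tests at each position whether any keyword starts there.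
import Mathlib
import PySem

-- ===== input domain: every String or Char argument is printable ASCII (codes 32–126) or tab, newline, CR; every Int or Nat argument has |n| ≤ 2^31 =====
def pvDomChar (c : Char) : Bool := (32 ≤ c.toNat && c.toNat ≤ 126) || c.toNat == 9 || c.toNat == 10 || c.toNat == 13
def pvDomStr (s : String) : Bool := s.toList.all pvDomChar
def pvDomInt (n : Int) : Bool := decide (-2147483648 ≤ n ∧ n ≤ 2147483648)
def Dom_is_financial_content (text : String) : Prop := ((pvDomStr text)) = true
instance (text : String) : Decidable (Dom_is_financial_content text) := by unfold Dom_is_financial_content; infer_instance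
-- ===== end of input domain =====

-- B replaces A's 19 independent substring-membership passes with one left-to-right
-- scan testing at each position whether a keyword starts there (alternative, same cost).

-- ===== PORT A =====
-- literal port of A: lower the text, then `any(keyword in text_lower for keyword in …)`
def is_financial_content (text : String) : Bool :=
  let financial_keywords : List String :=
    ["bond", "equity", "fund", "stock", "share", "isin", "cusip",
     "usd", "eur", "chf", "price", "value", "market", "portfolio",
     "valuation", "allocation", "yield", "maturity", "coupon"]
  let text_lower := PySem.Str.lower text
  financial_keywords.any (fun keyword => PySem.Str.isIn keyword text_lower)

-- ===== PORT B =====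
-- B's keyword tuple, as lists of chars (B works position-by-position on chars)
def pvKeywordsB : List (List Char) :=
  ["bond".toList, "equity".toList, "fund".toList, "stock".toList, "share".toList,
   "isin".toList, "cusip".toList, "usd".toList, "eur".toList, "chf".toList,
   "price".toList, "value".toList, "market".toList, "portfolio".toList,
   "valuation".toList, "allocation".toList, "yield".toList, "maturity".toList,
   "coupon".toList]

-- inner loop: `t.startswith(kw, i)` for each keyword, at the current position
def pvMatchHere (cs : List Char) : Bool :=
  pvKeywordsB.any (fun kw => kw.isPrefixOf cs)

-- outer loop: `for i in range(len(t))`, advancing one position per step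
def pvScan : List Char → Bool
  | [] => false
  | c :: rest => pvMatchHere (c :: rest) || pvScan rest

def is_financial_content_alt (text : String) : Bool :=
  pvScan (PySem.Chars.lower text.toList)

-- ===== PRECONDITION & SPEC =====
def Spec_is_financial_content (text : String) (out : Bool) : Prop := out = is_financial_content_alt text
instance (text : String) (out : Bool) : Decidable (Spec_is_financial_content text out) := by unfold Spec_is_financial_content; infer_instance

-- ===== CLAIM (what is proved, stated in full; the proofs are below) =====
def Claim_equal_is_financial_content : Prop := ∀ (text : String), Dom_is_financial_content text → Spec_is_financial_content text (is_financial_content text)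

-- ===== LEMMAS AND PROOFS =====

-- `sub in s` splits at a cons: match at the head position, or somewhere in the tail
theorem pv_isIn_cons (k : List Char) (c : Char) (rest : List Char) :
    PySem.Chars.isIn k (c :: rest) = (k.isPrefixOf (c :: rest) || PySem.Chars.isIn k rest) := by
  rw [Bool.eq_iff_iff]
  simp [PySem.Chars.isIn_iff_infix, List.infix_cons_iff]

theorem pv_any_or {α : Type} (l : List α) (p q : α → Bool) :
    (l.any fun x => p x || q x) = (l.any p || l.any q) := by
  induction l with
  | nil => simp
  | cons a t ih => simp [List.any_cons, ih, Bool.or_assoc, Bool.or_left_comm]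

-- the single scan finds a keyword iff some keyword is a substring
theorem pvScan_eq (cs : List Char) :
    pvScan cs = pvKeywordsB.any (fun kw => PySem.Chars.isIn kw cs) := by
  induction cs with
  | nil => decide
  | cons c rest ih =>
    have h : (pvKeywordsB.any fun kw => PySem.Chars.isIn kw (c :: rest))
        = (pvKeywordsB.any (fun kw => kw.isPrefixOf (c :: rest))
           || pvKeywordsB.any (fun kw => PySem.Chars.isIn kw rest)) := by
      rw [← pv_any_or]
      exact congrArg pvKeywordsB.any (funext fun kw => pv_isIn_cons kw c rest)
    rw [h]
    simp [pvScan, pvMatchHere, ih]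

-- ===== VERDICT (by name: the statement is the Claim_ definition above) =====
theorem is_financial_content_spec : Claim_equal_is_financial_content := by
  intro text _
  unfold Spec_is_financial_content is_financial_content is_financial_content_alt
  rw [pvScan_eq]
  simp [pvKeywordsB, PySem.Str.isIn_eq, PySem.Str.toList_lower]
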